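-- pv_equiv track=rewrite | github.com/JamesZwq/nclique | pivoter/proj1/autotest_out_q2/5356286_q2_autotest.py | binSort
-- ===== SOURCE A (Python) =====
-- def binSort(degree, b):
--     n = len(degree)
--     bins = [[] for _ in range(n)]
--
--     for i in range(n):
--         bins[degree[i]].append((i))
--
--     sortedList = [0] * n
--     position = [0] * n
--
--     ansCnt = 0
--     bcnt = 0
--     for bin in bins:
--         b[bcnt] = ansCnt
--         bcnt = bcnt + 1
--
--         for i in range(len(bin)):
--             sortedList[ansCnt] = bin[i]
--             position[bin[i]] = ansCnt
--             ansCnt = ansCnt + 1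
--     return (sortedList, position)
-- ===== SOURCE B (Python) =====
-- def binSort(degree, b):
--     # Counting sort with prefix sums instead of bucket lists.
--     # Like the original, this writes the bin start offsets into b in place.
--     n = len(degree)
--     count = [0] * n
--     for d in degree:
--         count[d] += 1
--     offset = [0] * n
--     run = 0
--     for d in range(n):
--         b[d] = run
--         offset[d] = run
--         run += count[d]
--     sortedList = [0] * n
--     position = [0] * n
--     for i in range(n):
--         d = degree[i]
--         p = offset[d]
--         sortedList[p] = i
--         position[i] = p
--         offset[d] = p + 1
--     return (sortedList, position)
-- ===== Notes on version B (the rewrite author's own statement) =====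
-- stated objective: alternative
-- what changed: Replaces the n bucket lists (build buckets, then walk every bucket appending members) by classic counting sort: an integer count array, a prefix-sum offset array, and one scatter pass that places each vertex directly at its final slot.
import Mathlib
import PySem

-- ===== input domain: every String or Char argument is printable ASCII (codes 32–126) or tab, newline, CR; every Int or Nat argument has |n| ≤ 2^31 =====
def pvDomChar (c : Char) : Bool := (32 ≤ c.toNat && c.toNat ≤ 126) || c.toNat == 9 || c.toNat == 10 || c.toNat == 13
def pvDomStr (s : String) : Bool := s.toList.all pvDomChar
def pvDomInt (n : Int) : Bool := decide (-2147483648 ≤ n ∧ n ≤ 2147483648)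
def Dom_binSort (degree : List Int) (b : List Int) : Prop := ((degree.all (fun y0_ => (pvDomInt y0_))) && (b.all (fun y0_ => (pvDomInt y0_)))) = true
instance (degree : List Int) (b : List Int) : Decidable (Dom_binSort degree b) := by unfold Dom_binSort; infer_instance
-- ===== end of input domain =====

-- B replaces A's bucket lists by counting sort with prefix sums (same asymptotic cost, different data structure).
-- Python A mutates its argument b in place (bin start offsets); B performs the identical writes to b;
-- the equivalence proved here is about the RETURN value, so both ports omit the writes to b
-- (they do not influence the returned pair).

-- ===== PORT A =====
def binSort (degree : List Int) (b : List Int) : List Int × List Int :=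
  let n := degree.length
  -- bins[degree[i]].append(i)  (bins[d] is read and the appended list stored back at the same index)
  let bins : List (List Int) :=
    (List.range n).foldl
      (fun (bins : List (List Int)) (i : Nat) =>
        PySem.List.pySetD bins (PySem.List.pyGetD degree (i : Int) 0)
          (PySem.List.pyGetD bins (PySem.List.pyGetD degree (i : Int) 0) [] ++ [(i : Int)]))
      (List.replicate n [])
  -- second loop: b[bcnt] = ansCnt writes omitted (b is not part of the return value)
  let fin :=
    bins.foldl
      (fun (st : List Int × List Int × Int) bin =>
        (List.range bin.length).foldl
          (fun (st : List Int × List Int × Int) (i : Nat) =>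
            (PySem.List.pySetD st.1 st.2.2 (PySem.List.pyGetD bin (i : Int) 0),
             PySem.List.pySetD st.2.1 (PySem.List.pyGetD bin (i : Int) 0) st.2.2,
             st.2.2 + 1))
          st)
      (List.replicate n 0, List.replicate n 0, 0)
  (fin.1, fin.2.1)

-- ===== PORT B =====
def binSort_alt (degree : List Int) (b : List Int) : List Int × List Int :=
  let n := degree.length
  let count : List Int :=
    degree.foldl (fun c d => PySem.List.pySetD c d (PySem.List.pyGetD c d 0 + 1))
      (List.replicate n 0)
  -- b[d] = run writes omitted (b is not part of the return value)
  let off :=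
    (List.range n).foldl
      (fun (st : List Int × Int) (d : Nat) =>
        (PySem.List.pySetD st.1 (d : Int) st.2, st.2 + PySem.List.pyGetD count (d : Int) 0))
      (List.replicate n 0, 0)
  let fin :=
    (List.range n).foldl
      (fun (st : List Int × List Int × List Int) (i : Nat) =>
        let d := PySem.List.pyGetD degree (i : Int) 0
        let p := PySem.List.pyGetD st.2.2 d 0
        (PySem.List.pySetD st.1 p (i : Int),
         PySem.List.pySetD st.2.1 (i : Int) p,
         PySem.List.pySetD st.2.2 d (p + 1)))
      (List.replicate n 0, List.replicate n 0, off.1)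
  (fin.1, fin.2.1)

-- ===== PRECONDITION & SPEC =====
-- Pre_ excludes exactly the inputs where Python A raises IndexError:
-- a degree value outside [-n, n) (bins[degree[i]]), or b shorter than n (b[bcnt] = ansCnt).
def Pre_binSort (degree : List Int) (b : List Int) : Prop :=
  (∀ d ∈ degree, -(degree.length : Int) ≤ d ∧ d < degree.length) ∧ degree.length ≤ b.length
instance (degree : List Int) (b : List Int) : Decidable (Pre_binSort degree b) := by
  unfold Pre_binSort; infer_instance

def pvWitness_binSort : List Int × List Int := ([1, 0, -1], [0, 0, 0])

def Spec_binSort (degree : List Int) (b : List Int) (out : List Int × List Int) : Prop := out = binSort_alt degree b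
instance (degree : List Int) (b : List Int) (out : List Int × List Int) : Decidable (Spec_binSort degree b out) := by unfold Spec_binSort; infer_instance

-- ===== CLAIM (what is proved, stated in full; the proofs are below) =====
def Claim_equal_binSort : Prop := ∀ (degree : List Int) (b : List Int), Dom_binSort degree b → Pre_binSort degree b → Spec_binSort degree b (binSort degree b)

-- ===== LEMMAS AND PROOFS =====

-- Python index normalization: for -n ≤ d < n, index d of a length-n list denotes slot pvWrap n d.
def pvWrap (n : Nat) (d : Int) : Nat := if d < 0 then n - (-d).toNat else d.toNat
-- The (wrapped) key of vertex i.
def pvKey (ks : List Nat) (i : Nat) : Nat := ks.getD i 0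
-- Start offset of bin j: number of vertices with key < j.
def pvS (ks : List Nat) (j : Nat) : Nat := ((List.range j).map (fun j' => ks.count j')).sum
-- Final position of vertex i.
def pvPos (ks : List Nat) (i : Nat) : Nat := pvS ks (pvKey ks i) + (ks.take i).count (pvKey ks i)
-- The vertices of bin j (prefix up to m).
def pvGrpM (ks : List Nat) (m j : Nat) : List Nat := (List.range m).filter (fun i => pvKey ks i == j)
-- The sorted order: bins concatenated.
def pvFlat (ks : List Nat) : List Nat := (List.range ks.length).flatMap (pvGrpM ks ks.length)
-- A sequence of writes s[q.1] = q.2.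
def pvScatter (L : List (Nat × Int)) (init : List Int) : List Int :=
  L.foldl (fun s q => s.set q.1 q.2) init

lemma pvWrap_lt {n : Nat} {d : Int} (h1 : -(n : Int) ≤ d) (h2 : d < n) : pvWrap n d < n := by
  unfold pvWrap; split <;> omega

lemma pyIdx_wrap {n : Nat} {d : Int} (h1 : -(n : Int) ≤ d) (h2 : d < n) :
    PySem.List.pyIdx? n d = some (pvWrap n d) := by
  simp only [PySem.List.pyIdx?, pvWrap]
  split <;> split <;> simp <;> omega

lemma pyGetD_wrap {α : Type} (xs : List α) {d : Int} (v : α)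
    (h1 : -(xs.length : Int) ≤ d) (h2 : d < xs.length) :
    PySem.List.pyGetD xs d v = xs.getD (pvWrap xs.length d) v := by
  simp [PySem.List.pyGetD, PySem.List.pyGet?, pyIdx_wrap h1 h2, List.getD_eq_getElem?_getD]

lemma pySetD_wrap {α : Type} (xs : List α) {d : Int} (v : α)
    (h1 : -(xs.length : Int) ≤ d) (h2 : d < xs.length) :
    PySem.List.pySetD xs d v = xs.set (pvWrap xs.length d) v := by
  simp [PySem.List.pySetD, PySem.List.pySet?, pyIdx_wrap h1 h2]

lemma length_pvScatter (L : List (Nat × Int)) (init : List Int) :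
    (pvScatter L init).length = init.length := by
  induction L generalizing init with
  | nil => rfl
  | cons q L ih =>
      rw [pvScatter, List.foldl_cons, ← pvScatter, ih, List.length_set]

lemma pvScatter_append (L1 L2 : List (Nat × Int)) (init : List Int) :
    pvScatter (L1 ++ L2) init = pvScatter L2 (pvScatter L1 init) := by
  simp [pvScatter, List.foldl_append]

lemma pvScatter_no_touch {L : List (Nat × Int)} {t : Nat} (h : ∀ q ∈ L, q.1 ≠ t)
    (init : List Int) : (pvScatter L init)[t]? = init[t]? := by
  induction L generalizing init with
  | nil => rfl
  | cons q L ih =>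
      rw [pvScatter, List.foldl_cons, ← pvScatter,
        ih (fun q hq => h q (List.mem_cons_of_mem _ hq)),
        List.getElem?_set_ne (h q (List.mem_cons_self) )]

lemma pvScatter_unique {L1 L2 : List (Nat × Int)} {t : Nat} {v : Int}
    (h2 : ∀ q ∈ L2, q.1 ≠ t) (init : List Int) (ht : t < init.length) :
    (pvScatter (L1 ++ (t, v) :: L2) init)[t]? = some v := by
  rw [pvScatter_append, pvScatter, List.foldl_cons, ← pvScatter, pvScatter_no_touch h2,
    List.getElem?_set_self]
  rwa [length_pvScatter]

lemma set_map_range {α : Type} (n : Nat) (f : Nat → α) (x : Nat) (v : α) :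
    ((List.range n).map f).set x v = (List.range n).map (fun j => if j = x then v else f j) := by
  apply List.ext_getElem <;> simp
  intro i hi
  rw [List.getElem_set]
  by_cases h : x = i <;> simp [h]
  exact fun h' => absurd h'.symm h

lemma map_range_congr {α : Type} {n : Nat} {f g : Nat → α} (h : ∀ j < n, f j = g j) :
    (List.range n).map f = (List.range n).map g :=
  List.map_congr_left (fun j hj => h j (List.mem_range.mp hj))

lemma range_split' (i k : Nat) :
    List.range (i + (k + 1)) = List.range i ++ i :: ((List.range k).map (fun x => i + 1 + x)) := by
  induction k with
  | zero => simp [List.range_succ]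
  | succ k ih =>
      rw [show i + (k + 1 + 1) = (i + (k + 1)) + 1 from by omega, List.range_succ, ih,
        List.range_succ, List.map_append]
      simp [show i + 1 + k = i + (k + 1) from by omega]

lemma range_split {i n : Nat} (h : i < n) :
    List.range n = List.range i ++ i :: ((List.range (n - i - 1)).map (fun x => i + 1 + x)) := by
  have := range_split' i (n - i - 1)
  rwa [show i + (n - i - 1 + 1) = n from by omega] at this

lemma countP_lt_succ (l : List Nat) (n : Nat) :
    l.countP (fun x => x < n + 1) = l.countP (fun x => x < n) + l.count n := by
  induction l with
  | nil => rfl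
  | cons a t ih =>
      simp only [List.countP_cons, List.count_cons, ih]
      rcases Nat.lt_trichotomy a n with h | h | h
      · simp [h, Nat.lt_succ_of_lt h, Nat.ne_of_lt h]; omega
      · simp [h]; omega
      · simp [Nat.lt_asymm h, Nat.ne_of_gt h]; omega

lemma sum_count_eq_countP (l : List Nat) (n : Nat) :
    ((List.range n).map (fun j => l.count j)).sum = l.countP (fun x => x < n) := by
  induction n with
  | zero => simp
  | succ n ih =>
      rw [List.range_succ, List.map_append, List.sum_append, ih, countP_lt_succ]
      simp

lemma pvS_succ (ks : List Nat) (j : Nat) : pvS ks (j + 1) = pvS ks j + ks.count j := by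
  simp [pvS, List.range_succ]

lemma pvS_mono (ks : List Nat) {j j' : Nat} (h : j ≤ j') : pvS ks j ≤ pvS ks j' := by
  induction j', h using Nat.le_induction with
  | base => exact le_rfl
  | succ j' hj ih => rw [pvS_succ]; omega

lemma pvS_length (ks : List Nat) (hk : ∀ x ∈ ks, x < ks.length) :
    pvS ks ks.length = ks.length := by
  rw [pvS, sum_count_eq_countP]
  exact List.countP_eq_length.mpr (fun a ha => by simpa using hk a ha)

lemma count_filter_range (ks : List Nat) (j : Nat) {m : Nat} (hm : m ≤ ks.length) :
    (pvGrpM ks m j).length = (ks.take m).count j := by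
  induction m with
  | zero => simp [pvGrpM]
  | succ m ih =>
      have hm' : m < ks.length := by omega
      rw [pvGrpM, List.range_succ, List.filter_append, List.length_append, ← pvGrpM,
        ih (by omega), List.take_add_one, List.count_append]
      congr 1
      have : ks[m]?.toList = [ks[m]] := by simp [List.getElem?_eq_getElem hm']
      rw [this]
      simp only [List.filter, pvKey, List.getD_eq_getElem ks 0 hm']
      by_cases h : ks[m] = j
      · simp [h]
      · have hb : (ks[m] == j) = false := by simpa using h
        simp [hb, h]

lemma count_take_lt (ks : List Nat) {i : Nat} (hi : i < ks.length) :
    (ks.take i).count (pvKey ks i) < ks.count (pvKey ks i) := by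
  have h0 : pvKey ks i = ks[i] := by
    simp [pvKey, List.getD_eq_getElem?_getD, List.getElem?_eq_getElem hi]
  obtain ⟨a, ha⟩ : ∃ a, ks[i] = a := ⟨_, rfl⟩
  rw [h0, ha]
  conv_rhs => rw [← List.take_append_drop i ks]
  rw [List.count_append, List.drop_eq_getElem_cons hi, ha, List.count_cons]
  simp only [beq_self_eq_true, if_true]
  omega

lemma grpM_succ (ks : List Nat) (m j : Nat) :
    pvGrpM ks (m + 1) j =
      pvGrpM ks m j ++ (if pvKey ks m = j then [m] else []) := by
  rw [pvGrpM, List.range_succ, List.filter_append, ← pvGrpM]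
  congr 1
  by_cases h : pvKey ks m = j <;> simp [h]

lemma pos_lt (ks : List Nat) (hk : ∀ x ∈ ks, x < ks.length) {i : Nat} (hi : i < ks.length) :
    pvPos ks i < ks.length := by
  have hkey : pvKey ks i < ks.length := by
    have := hk (ks.getD i 0) (by rw [List.getD_eq_getElem ks 0 hi]; exact List.getElem_mem hi)
    simpa [pvKey] using this
  calc pvPos ks i < pvS ks (pvKey ks i) + ks.count (pvKey ks i) := by
        have := count_take_lt ks hi; unfold pvPos; omega
    _ = pvS ks (pvKey ks i + 1) := (pvS_succ _ _).symm
    _ ≤ pvS ks ks.length := pvS_mono ks (by omega)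
    _ = ks.length := pvS_length ks hk

lemma key_lt (ks : List Nat) (hk : ∀ x ∈ ks, x < ks.length) {i : Nat} (hi : i < ks.length) :
    pvKey ks i < ks.length := by
  have := hk (ks.getD i 0) (by rw [List.getD_eq_getElem ks 0 hi]; exact List.getElem_mem hi)
  simpa [pvKey] using this

lemma grpM_getElem (ks : List Nat) {i : Nat} (hi : i < ks.length) :
    (pvGrpM ks ks.length (pvKey ks i))[(ks.take i).count (pvKey ks i)]? = some i := by
  have hlen := count_filter_range ks (pvKey ks i) (le_of_lt hi)
  simp only [pvGrpM] at hlen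
  rw [pvGrpM, range_split hi, List.filter_append, List.filter_cons_of_pos (by simp),
    List.getElem?_append_right (le_of_eq hlen)]
  simp [hlen]

lemma flat_prefix_length (ks : List Nat) (j : Nat) :
    ((List.range j).flatMap (pvGrpM ks ks.length)).length = pvS ks j := by
  rw [List.length_flatMap, pvS]
  congr 1
  refine List.map_congr_left (fun j' _ => ?_)
  rw [count_filter_range ks j' (le_refl _), List.take_length]

lemma flat_length (ks : List Nat) (hk : ∀ x ∈ ks, x < ks.length) :
    (pvFlat ks).length = ks.length := by
  rw [pvFlat, flat_prefix_length, pvS_length ks hk]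

lemma flat_getElem_pos (ks : List Nat) (hk : ∀ x ∈ ks, x < ks.length) {i : Nat}
    (hi : i < ks.length) : (pvFlat ks)[pvPos ks i]? = some i := by
  have hj : pvKey ks i < ks.length := key_lt ks hk hi
  have hG : (pvGrpM ks ks.length (pvKey ks i)).length = ks.count (pvKey ks i) := by
    rw [count_filter_range ks _ (le_refl _), List.take_length]
  have hc : (ks.take i).count (pvKey ks i) < (pvGrpM ks ks.length (pvKey ks i)).length := by
    rw [hG]; exact count_take_lt ks hi
  rw [pvFlat, range_split hj, List.flatMap_append, List.flatMap_cons, pvPos,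
    List.getElem?_append_right (by rw [flat_prefix_length]; omega),
    flat_prefix_length]
  rw [Nat.add_sub_cancel_left, List.getElem?_append_left hc]
  exact grpM_getElem ks hi

lemma pos_inj (ks : List Nat) (hk : ∀ x ∈ ks, x < ks.length) {i i' : Nat}
    (hi : i < ks.length) (hi' : i' < ks.length) (h : pvPos ks i = pvPos ks i') : i = i' := by
  have h1 := flat_getElem_pos ks hk hi
  have h2 := flat_getElem_pos ks hk hi'
  rw [h] at h1
  rw [h1] at h2
  exact Option.some_injective _ h2

lemma pos_surj (ks : List Nat) (hk : ∀ x ∈ ks, x < ks.length) {t : Nat}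
    (ht : t < ks.length) : ∃ i, i < ks.length ∧ pvPos ks i = t := by
  have hinj : Set.InjOn (pvPos ks) ↑(Finset.range ks.length) := by
    intro i hi i' hi' h
    rw [Finset.mem_coe, Finset.mem_range] at hi hi'
    exact pos_inj ks hk hi hi' h
  have him : (Finset.range ks.length).image (pvPos ks) = Finset.range ks.length :=
    Finset.eq_of_subset_of_card_le
      (by
        intro t' ht'
        rw [Finset.mem_image] at ht'
        obtain ⟨i, hi, rfl⟩ := ht'
        rw [Finset.mem_range] at hi ⊢
        exact pos_lt ks hk hi)
      (le_of_eq (by rw [Finset.card_image_of_injOn hinj]))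
  have hmem : t ∈ (Finset.range ks.length).image (pvPos ks) := by
    rw [him, Finset.mem_range]; exact ht
  rw [Finset.mem_image] at hmem
  obtain ⟨i, hi, h⟩ := hmem
  exact ⟨i, Finset.mem_range.mp hi, h⟩


-- Bridges between the raw Int degrees of the ports and the normalized Nat keys.
lemma ks_bound (degree : List Int)
    (hd : ∀ d ∈ degree, -(degree.length : Int) ≤ d ∧ d < degree.length) :
    ∀ x ∈ degree.map (pvWrap degree.length), x < (degree.map (pvWrap degree.length)).length := by
  intro x hx
  rw [List.length_map]
  rw [List.mem_map] at hx
  obtain ⟨d, hdm, rfl⟩ := hx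
  exact pvWrap_lt (hd d hdm).1 (hd d hdm).2

lemma key_eq (degree : List Int) (m : Nat) (hm : m < degree.length) :
    pvKey (degree.map (pvWrap degree.length)) m = pvWrap degree.length (degree.getD m 0) := by
  rw [pvKey, List.getD_eq_getElem _ 0 (by simpa using hm), List.getElem_map,
    List.getD_eq_getElem degree 0 hm]

lemma getD_mem (degree : List Int) (m : Nat) (hm : m < degree.length) :
    degree.getD m 0 ∈ degree := by
  rw [List.getD_eq_getElem degree 0 hm]; exact List.getElem_mem hm

-- Phase 1 of A: the bucket lists are exactly the groups pvGrpM.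
lemma A_phase1 (degree : List Int)
    (hd : ∀ d ∈ degree, -(degree.length : Int) ≤ d ∧ d < degree.length) :
    ∀ m, m ≤ degree.length →
      (List.range m).foldl
        (fun (bins : List (List Int)) (i : Nat) =>
          PySem.List.pySetD bins (PySem.List.pyGetD degree (i : Int) 0)
            (PySem.List.pyGetD bins (PySem.List.pyGetD degree (i : Int) 0) [] ++ [(i : Int)]))
        (List.replicate degree.length ([] : List Int))
      = (List.range degree.length).map
          (fun j => (pvGrpM (degree.map (pvWrap degree.length)) m j).map (fun (i : Nat) => (i : Int))) := by
  intro m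
  induction m with
  | zero =>
      intro _
      simp [pvGrpM, List.map_const']
  | succ m ih =>
      intro hm1
      have hm : m < degree.length := by omega
      rw [List.range_succ, List.foldl_append, ih (by omega), List.foldl_cons, List.foldl_nil]
      have hdg : PySem.List.pyGetD degree (m : Int) 0 = degree.getD m 0 :=
        PySem.List.pyGetD_natCast degree m 0
      obtain ⟨hlo, hhi⟩ := hd _ (getD_mem degree m hm)
      have hkeq : pvWrap degree.length (degree.getD m 0)
          = pvKey (degree.map (pvWrap degree.length)) m := (key_eq degree m hm).symm
      have hklt : pvKey (degree.map (pvWrap degree.length)) m < degree.length := by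
        rw [← hkeq]; exact pvWrap_lt hlo hhi
      have hBlen : ((List.range degree.length).map
          (fun j => (pvGrpM (degree.map (pvWrap degree.length)) m j).map
            (fun (i : Nat) => (i : Int)))).length = degree.length := by simp
      rw [hdg,
        pyGetD_wrap _ _ (by rw [hBlen]; exact hlo) (by rw [hBlen]; exact hhi),
        pySetD_wrap _ _ (by rw [hBlen]; exact hlo) (by rw [hBlen]; exact hhi),
        hBlen, hkeq, PySem.List.getD_map_range _ _ _ _ hklt, set_map_range]
      refine map_range_congr (fun j hj => ?_)
      by_cases h : j = pvKey (degree.map (pvWrap degree.length)) m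
      · subst h
        rw [if_pos rfl, grpM_succ, if_pos rfl, List.map_append, List.map_cons, List.map_nil]
      · rw [if_neg h, grpM_succ, if_neg (fun h' => h h'.symm), List.append_nil]

-- A for-loop 'for i in range(len(bin)): ... bin[i] ...' is a fold over bin.
lemma foldl_range_getD {β : Type} (l : List Int) (f : β → Int → β) :
    ∀ st : β,
      (List.range l.length).foldl (fun st i => f st (l.getD i 0)) st = l.foldl f st := by
  induction l with
  | nil => intro st; rfl
  | cons x t ih =>
      intro st
      rw [List.length_cons, List.range_succ_eq_map, List.foldl_cons, List.getD_cons_zero,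
        List.foldl_map, List.foldl_cons]
      have : (fun (st : β) (i : Nat) => f st ((x :: t).getD i.succ 0))
           = (fun (st : β) (i : Nat) => f st (t.getD i 0)) := by
        funext st i
        rw [Nat.succ_eq_add_one, List.getD_cons_succ]
      rw [this, ih]

lemma pvScatter_cons (q : Nat × Int) (L : List (Nat × Int)) (init : List Int) :
    pvScatter (q :: L) init = pvScatter L (init.set q.1 q.2) := rfl

lemma pvScatter_snoc (L : List (Nat × Int)) (q : Nat × Int) (init : List Int) :
    pvScatter (L ++ [q]) init = (pvScatter L init).set q.1 q.2 := by
  rw [pvScatter_append, pvScatter_cons]; rfl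

-- The sequential write loop of A, over the flattened buckets.
lemma seqWrite (VS : List Nat) :
    ∀ (t0 : Nat) (s p : List Int),
      (VS.map (fun (v : Nat) => (v : Int))).foldl
        (fun (st : List Int × List Int × Int) v =>
          (PySem.List.pySetD st.1 st.2.2 v, PySem.List.pySetD st.2.1 v st.2.2, st.2.2 + 1))
        (s, p, (t0 : Int))
      = (pvScatter ((VS.zipIdx t0).map (fun q => (q.2, (q.1 : Int)))) s,
         pvScatter ((VS.zipIdx t0).map (fun q => (q.1, (q.2 : Int)))) p,
         ((t0 + VS.length : Nat) : Int)) := by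
  induction VS with
  | nil => intro t0 s p; simp [pvScatter]
  | cons v VS ih =>
      intro t0 s p
      rw [List.map_cons, List.foldl_cons]
      simp only [PySem.List.pySetD_natCast]
      have h1 : ((t0 : Int) + 1) = (((t0 + 1 : Nat)) : Int) := by push_cast; ring
      rw [h1, ih (t0 + 1)]
      rw [List.zipIdx_cons, List.map_cons, List.map_cons, pvScatter_cons, pvScatter_cons]
      refine congrArg₂ Prod.mk rfl (congrArg₂ Prod.mk rfl ?_)
      simp only [List.length_cons]
      push_cast
      omega


-- B's counting pass.
lemma B_count (n : Nat) :
    ∀ (l : List Int), (∀ d ∈ l, -(n : Int) ≤ d ∧ d < n) → ∀ (g : Nat → Nat),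
      l.foldl (fun c d => PySem.List.pySetD c d (PySem.List.pyGetD c d 0 + 1))
          ((List.range n).map (fun j => ((g j : Nat) : Int)))
      = (List.range n).map (fun j => ((g j + (l.map (pvWrap n)).count j : Nat) : Int)) := by
  intro l
  induction l with
  | nil => intro _ g; simp
  | cons d l ih =>
      intro hd g
      obtain ⟨hlo, hhi⟩ := hd d List.mem_cons_self
      rw [List.foldl_cons]
      have hlen : ((List.range n).map (fun j => ((g j : Nat) : Int))).length = n := by simp
      rw [pyGetD_wrap _ _ (by rw [hlen]; exact hlo) (by rw [hlen]; exact hhi),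
        pySetD_wrap _ _ (by rw [hlen]; exact hlo) (by rw [hlen]; exact hhi), hlen]
      have hw : pvWrap n d < n := pvWrap_lt hlo hhi
      rw [PySem.List.getD_map_range _ _ _ _ hw, set_map_range]
      have heq : (List.range n).map
            (fun j => if j = pvWrap n d then ((g (pvWrap n d) : Nat) : Int) + 1
              else ((g j : Nat) : Int))
          = (List.range n).map
            (fun j => (((if j = pvWrap n d then g j + 1 else g j : Nat)) : Int)) :=
        map_range_congr (fun j hj => by
          by_cases h : j = pvWrap n d
          · subst h; simp
          · simp [h])
      rw [heq, ih (fun d' hd' => hd d' (List.mem_cons_of_mem _ hd'))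
        (fun j => if j = pvWrap n d then g j + 1 else g j)]
      refine map_range_congr (fun j hj => ?_)
      rw [List.map_cons, List.count_cons]
      by_cases h : j = pvWrap n d
      · subst h; simp; omega
      · have hb : (pvWrap n d == j) = false := by simpa using fun h' => h h'.symm
        simp [h, hb]

-- B's prefix-sum pass.
lemma B_off (n : Nat) (ks : List Nat) :
    ∀ m, m ≤ n →
      (List.range m).foldl
        (fun (st : List Int × Int) (d : Nat) =>
          (PySem.List.pySetD st.1 (d : Int) st.2,
           st.2 + PySem.List.pyGetD
             ((List.range n).map (fun j => ((ks.count j : Nat) : Int))) (d : Int) 0))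
        (List.replicate n 0, 0)
      = ((List.range n).map (fun j => if j < m then ((pvS ks j : Nat) : Int) else 0),
         ((pvS ks m : Nat) : Int)) := by
  intro m
  induction m with
  | zero =>
      intro _
      simp [pvS, List.map_const']
  | succ m ih =>
      intro hm1
      have hm : m < n := by omega
      rw [List.range_succ, List.foldl_append, ih (by omega), List.foldl_cons, List.foldl_nil]
      rw [PySem.List.pySetD_natCast, PySem.List.pyGetD_natCast,
        PySem.List.getD_map_range _ _ _ _ hm, set_map_range]
      refine congrArg₂ Prod.mk ?_ ?_
      · refine map_range_congr (fun j hj => ?_)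
        rcases Nat.lt_trichotomy j m with h | h | h
        · rw [if_neg (by omega), if_pos h, if_pos (by omega)]
        · subst h; rw [if_pos rfl, if_pos (by omega)]
        · rw [if_neg (by omega), if_neg (by omega), if_neg (by omega)]
      · rw [pvS_succ]; push_cast; ring

-- B's scatter pass.
lemma B_scat (degree : List Int)
    (hd : ∀ d ∈ degree, -(degree.length : Int) ≤ d ∧ d < degree.length) :
    ∀ m, m ≤ degree.length →
      (List.range m).foldl
        (fun (st : List Int × List Int × List Int) (i : Nat) =>
          (PySem.List.pySetD st.1
             (PySem.List.pyGetD st.2.2 (PySem.List.pyGetD degree (i : Int) 0) 0) (i : Int),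
           PySem.List.pySetD st.2.1 (i : Int)
             (PySem.List.pyGetD st.2.2 (PySem.List.pyGetD degree (i : Int) 0) 0),
           PySem.List.pySetD st.2.2 (PySem.List.pyGetD degree (i : Int) 0)
             (PySem.List.pyGetD st.2.2 (PySem.List.pyGetD degree (i : Int) 0) 0 + 1)))
        (List.replicate degree.length 0, List.replicate degree.length 0,
          (List.range degree.length).map
            (fun j => ((pvS (degree.map (pvWrap degree.length)) j : Nat) : Int)))
      = (pvScatter ((List.range m).map
            (fun i => (pvPos (degree.map (pvWrap degree.length)) i, (i : Int))))
          (List.replicate degree.length 0),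
         pvScatter ((List.range m).map
            (fun i => (i, ((pvPos (degree.map (pvWrap degree.length)) i : Nat) : Int))))
          (List.replicate degree.length 0),
         (List.range degree.length).map
           (fun j => ((pvS (degree.map (pvWrap degree.length)) j
             + ((degree.map (pvWrap degree.length)).take m).count j : Nat) : Int))) := by
  intro m
  induction m with
  | zero =>
      intro _
      simp [pvScatter]
  | succ m ih =>
      intro hm1
      have hm : m < degree.length := by omega
      have hmk : m < (degree.map (pvWrap degree.length)).length := by simp [hm]
      rw [List.range_succ, List.foldl_append, ih (by omega), List.foldl_cons, List.foldl_nil]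
      simp only []
      have hdg : PySem.List.pyGetD degree (m : Int) 0 = degree.getD m 0 :=
        PySem.List.pyGetD_natCast degree m 0
      obtain ⟨hlo, hhi⟩ := hd _ (getD_mem degree m hm)
      have hkeq : pvWrap degree.length (degree.getD m 0)
          = pvKey (degree.map (pvWrap degree.length)) m := (key_eq degree m hm).symm
      have hklt : pvKey (degree.map (pvWrap degree.length)) m < degree.length := by
        rw [← hkeq]; exact pvWrap_lt hlo hhi
      set n := degree.length with hn
      set ks := degree.map (pvWrap n) with hksdef
      set O := (List.range n).map (fun j => ((pvS ks j + (ks.take m).count j : Nat) : Int)) with hO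
      have hOlen : O.length = n := by simp [hO]
      rw [hdg]
      have hget : PySem.List.pyGetD O (degree.getD m 0) 0 = ((pvPos ks m : Nat) : Int) := by
        rw [pyGetD_wrap O _ (by rw [hOlen]; exact hlo) (by rw [hOlen]; exact hhi), hOlen, hkeq,
          hO, PySem.List.getD_map_range _ _ _ _ hklt]
        rfl
      have hsetO : PySem.List.pySetD O (degree.getD m 0) (((pvPos ks m : Nat) : Int) + 1)
          = O.set (pvKey ks m) (((pvPos ks m : Nat) : Int) + 1) := by
        rw [pySetD_wrap O _ (by rw [hOlen]; exact hlo) (by rw [hOlen]; exact hhi), hOlen, hkeq]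
      rw [hget, hsetO, PySem.List.pySetD_natCast, PySem.List.pySetD_natCast]
      refine congrArg₂ Prod.mk ?_ (congrArg₂ Prod.mk ?_ ?_)
      · rw [List.map_append, List.map_cons, List.map_nil, pvScatter_snoc]
      · rw [List.map_append, List.map_cons, List.map_nil, pvScatter_snoc]
      · rw [hO, set_map_range]
        refine map_range_congr (fun j hj => ?_)
        have htake : ks.take (m + 1) = ks.take m ++ [ks[m]] := by
          rw [List.take_add_one, List.getElem?_eq_getElem hmk]
          rfl
        have hkm : ks[m] = pvKey ks m := by
          rw [pvKey, List.getD_eq_getElem _ 0 hmk]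
        by_cases h : j = pvKey ks m
        · subst h
          rw [if_pos rfl, htake, List.count_append, hkm]
          have h1 : List.count (pvKey ks m) [pvKey ks m] = 1 := by simp
          rw [h1, pvPos]
          push_cast
          ring
        · rw [if_neg h, htake, List.count_append, hkm]
          have hb : List.count j [pvKey ks m] = 0 := by
            simp [List.count_singleton]
            exact fun h' => h h'.symm
          rw [hb]
          simp


lemma zipIdx_decomp (X : List Nat) {t : Nat} (ht : t < X.length) :
    X.zipIdx 0 = (X.take t).zipIdx 0 ++ (X[t], t) :: (X.drop (t + 1)).zipIdx (t + 1) := by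
  conv_lhs => rw [← List.take_append_drop t X, List.drop_eq_getElem_cons ht]
  rw [List.zipIdx_append, List.zipIdx_cons]
  have h1 : (X.take t).length = t := by
    rw [List.length_take]; omega
  rw [h1]
  norm_num

-- The two sortedList scatters agree.
lemma scatter_s_eq (ks : List Nat) (hk : ∀ x ∈ ks, x < ks.length) :
    pvScatter (((pvFlat ks).zipIdx 0).map (fun q => (q.2, (q.1 : Int))))
        (List.replicate ks.length 0)
    = pvScatter ((List.range ks.length).map (fun i => (pvPos ks i, (i : Int))))
        (List.replicate ks.length 0) := by
  have hfl := flat_length ks hk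
  apply List.ext_getElem?
  intro t
  by_cases ht : t < ks.length
  · obtain ⟨i0, hi0, hpos⟩ := pos_surj ks hk ht
    have htf : t < (pvFlat ks).length := by omega
    have hA : (pvScatter (((pvFlat ks).zipIdx 0).map (fun q => (q.2, (q.1 : Int))))
        (List.replicate ks.length 0))[t]? = some (((pvFlat ks)[t] : Nat) : Int) := by
      rw [zipIdx_decomp (pvFlat ks) htf, List.map_append, List.map_cons]
      refine pvScatter_unique (fun q hq => ?_) _ (by simpa using ht)
      rw [List.mem_map] at hq
      obtain ⟨q', hq', rfl⟩ := hq
      obtain ⟨h1, h2, h3⟩ := List.mem_zipIdx hq'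
      omega
    have hB : (pvScatter ((List.range ks.length).map (fun i => (pvPos ks i, (i : Int))))
        (List.replicate ks.length 0))[t]? = some ((i0 : Nat) : Int) := by
      rw [range_split hi0, List.map_append, List.map_cons, hpos]
      refine pvScatter_unique (fun q hq => ?_) _ (by simpa using ht)
      rw [List.map_map, List.mem_map] at hq
      obtain ⟨x, hx, rfl⟩ := hq
      rw [List.mem_range] at hx
      intro hqt
      have := pos_inj ks hk (by omega : i0 + 1 + x < ks.length) hi0
        (by simpa [hpos] using hqt)
      omega
    have hv : (pvFlat ks)[t] = i0 := by
      have h1 := flat_getElem_pos ks hk hi0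
      rw [hpos, List.getElem?_eq_getElem htf] at h1
      exact Option.some_injective _ h1
    rw [hA, hB, hv]
  · rw [List.getElem?_eq_none, List.getElem?_eq_none] <;>
      rw [length_pvScatter, List.length_replicate] <;> omega

-- The two position scatters agree.
lemma scatter_p_eq (ks : List Nat) (hk : ∀ x ∈ ks, x < ks.length) :
    pvScatter (((pvFlat ks).zipIdx 0).map (fun q => (q.1, (q.2 : Int))))
        (List.replicate ks.length 0)
    = pvScatter ((List.range ks.length).map (fun i => (i, ((pvPos ks i : Nat) : Int))))
        (List.replicate ks.length 0) := by
  have hfl := flat_length ks hk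
  apply List.ext_getElem?
  intro v
  by_cases hv : v < ks.length
  · have hposv : pvPos ks v < ks.length := pos_lt ks hk hv
    have htf : pvPos ks v < (pvFlat ks).length := by omega
    have hval : (pvFlat ks)[pvPos ks v] = v := by
      have h1 := flat_getElem_pos ks hk hv
      rw [List.getElem?_eq_getElem htf] at h1
      exact Option.some_injective _ h1
    have hA : (pvScatter (((pvFlat ks).zipIdx 0).map (fun q => (q.1, (q.2 : Int))))
        (List.replicate ks.length 0))[v]? = some ((pvPos ks v : Nat) : Int) := by
      rw [zipIdx_decomp (pvFlat ks) htf, List.map_append, List.map_cons, hval]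
      refine pvScatter_unique (fun q hq => ?_) _ (by simpa using hv)
      rw [List.mem_map] at hq
      obtain ⟨q', hq', rfl⟩ := hq
      obtain ⟨h1, h2, h3⟩ := List.mem_zipIdx hq'
      have hlen : ((pvFlat ks).drop (pvPos ks v + 1)).length
          = (pvFlat ks).length - (pvPos ks v + 1) := by
        rw [List.length_drop]
      have hq2 : q'.2 < ks.length := by omega
      have hq1 : q'.1 = (pvFlat ks)[q'.2]'(by omega) := by
        rw [h3]
        rw [List.getElem_drop (xs := pvFlat ks) (i := pvPos ks v + 1)
          (j := q'.2 - (pvPos ks v + 1)) (h := by omega)]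
        congr 1
        omega
      intro hqv
      obtain ⟨i', hi', hposi'⟩ := pos_surj ks hk hq2
      have hfi' : (pvFlat ks)[q'.2]'(by omega) = i' := by
        have h4 := flat_getElem_pos ks hk hi'
        rw [hposi', List.getElem?_eq_getElem (by omega : q'.2 < (pvFlat ks).length)] at h4
        exact Option.some_injective _ h4
      have : i' = v := by rw [← hfi', ← hq1, hqv]
      subst this
      omega
    have hB : (pvScatter ((List.range ks.length).map
          (fun i => (i, ((pvPos ks i : Nat) : Int))))
        (List.replicate ks.length 0))[v]? = some ((pvPos ks v : Nat) : Int) := by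
      rw [range_split hv, List.map_append, List.map_cons]
      refine pvScatter_unique (fun q hq => ?_) _ (by simpa using hv)
      rw [List.map_map, List.mem_map] at hq
      obtain ⟨x, hx, rfl⟩ := hq
      show v + 1 + x ≠ v
      omega
    rw [hA, hB]
  · rw [List.getElem?_eq_none, List.getElem?_eq_none] <;>
      rw [length_pvScatter, List.length_replicate] <;> omega


lemma seqWrite0 (VS : List Nat) (s p : List Int) :
    (VS.map (fun (v : Nat) => (v : Int))).foldl
      (fun (st : List Int × List Int × Int) v =>
        (PySem.List.pySetD st.1 st.2.2 v, PySem.List.pySetD st.2.1 v st.2.2, st.2.2 + 1))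
      (s, p, (0 : Int))
    = (pvScatter ((VS.zipIdx 0).map (fun q => (q.2, (q.1 : Int)))) s,
       pvScatter ((VS.zipIdx 0).map (fun q => (q.1, (q.2 : Int)))) p,
       ((VS.length : Nat) : Int)) := by
  have := seqWrite VS 0 s p
  simpa using this

-- A computes the pair of scatters over the flattened buckets.
lemma A_result (degree b : List Int)
    (hd : ∀ d ∈ degree, -(degree.length : Int) ≤ d ∧ d < degree.length) :
    binSort degree b
    = (pvScatter (((pvFlat (degree.map (pvWrap degree.length))).zipIdx 0).map
          (fun q => (q.2, (q.1 : Int)))) (List.replicate degree.length 0),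
       pvScatter (((pvFlat (degree.map (pvWrap degree.length))).zipIdx 0).map
          (fun q => (q.1, (q.2 : Int)))) (List.replicate degree.length 0)) := by
  simp only [binSort]
  rw [A_phase1 degree hd degree.length (le_refl _)]
  have hfun : (fun (st : List Int × List Int × Int) (bin : List Int) =>
        (List.range bin.length).foldl
          (fun (st : List Int × List Int × Int) (i : Nat) =>
            (PySem.List.pySetD st.1 st.2.2 (PySem.List.pyGetD bin (i : Int) 0),
             PySem.List.pySetD st.2.1 (PySem.List.pyGetD bin (i : Int) 0) st.2.2,
             st.2.2 + 1))
          st)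
      = (fun (st : List Int × List Int × Int) (bin : List Int) =>
          bin.foldl
            (fun (st : List Int × List Int × Int) v =>
              (PySem.List.pySetD st.1 st.2.2 v, PySem.List.pySetD st.2.1 v st.2.2,
               st.2.2 + 1))
            st) := by
    funext st bin
    simp only [PySem.List.pyGetD_natCast]
    exact foldl_range_getD bin
      (fun st v =>
        (PySem.List.pySetD st.1 st.2.2 v, PySem.List.pySetD st.2.1 v st.2.2, st.2.2 + 1)) st
  rw [hfun, ← List.foldl_flatten]
  have hflatten : ((List.range degree.length).map
        (fun j => (pvGrpM (degree.map (pvWrap degree.length)) degree.length j).map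
          (fun (i : Nat) => (i : Int)))).flatten
      = (pvFlat (degree.map (pvWrap degree.length))).map (fun (i : Nat) => (i : Int)) := by
    rw [pvFlat, List.flatMap_def, List.map_flatten, List.map_map, List.length_map]
    rfl
  rw [hflatten, seqWrite0]

-- B computes the pair of scatters over the positions.
lemma B_result (degree b : List Int)
    (hd : ∀ d ∈ degree, -(degree.length : Int) ≤ d ∧ d < degree.length) :
    binSort_alt degree b
    = (pvScatter ((List.range degree.length).map
          (fun i => (pvPos (degree.map (pvWrap degree.length)) i, (i : Int))))
        (List.replicate degree.length 0),
       pvScatter ((List.range degree.length).map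
          (fun i => (i, ((pvPos (degree.map (pvWrap degree.length)) i : Nat) : Int))))
        (List.replicate degree.length 0)) := by
  simp only [binSort_alt]
  have hcount : degree.foldl
        (fun c d => PySem.List.pySetD c d (PySem.List.pyGetD c d 0 + 1))
        (List.replicate degree.length 0)
      = (List.range degree.length).map
          (fun j => (((degree.map (pvWrap degree.length)).count j : Nat) : Int)) := by
    have h0 : List.replicate degree.length (0 : Int)
        = (List.range degree.length).map (fun j => (((fun _ => 0 : Nat → Nat) j : Nat) : Int)) := by
      simp [List.map_const']
    rw [h0, B_count degree.length degree hd (fun _ => 0)]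
    exact map_range_congr (fun j hj => by simp)
  rw [hcount]
  have hoff : ((List.range degree.length).foldl
        (fun (st : List Int × Int) (d : Nat) =>
          (PySem.List.pySetD st.1 (d : Int) st.2,
           st.2 + PySem.List.pyGetD
             ((List.range degree.length).map
               (fun j => (((degree.map (pvWrap degree.length)).count j : Nat) : Int))) (d : Int) 0))
        (List.replicate degree.length 0, 0)).1
      = (List.range degree.length).map
          (fun j => ((pvS (degree.map (pvWrap degree.length)) j : Nat) : Int)) := by
    have h1 := B_off degree.length (degree.map (pvWrap degree.length)) degree.length (le_refl _)
    have h2 := congrArg Prod.fst h1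
    simp only [] at h2
    rw [h2]
    exact map_range_congr (fun j hj => by rw [if_pos hj])
  rw [hoff, B_scat degree hd degree.length (le_refl _)]

-- ===== VERDICT (by name: the statement is the Claim_ definition above) =====
theorem binSort_spec : Claim_equal_binSort := by
  unfold Claim_equal_binSort
  intro degree b _dom hpre
  unfold Spec_binSort
  obtain ⟨hd, _hb⟩ := hpre
  have hkb : ∀ x ∈ degree.map (pvWrap degree.length),
      x < (degree.map (pvWrap degree.length)).length := ks_bound degree hd
  have hklen : (degree.map (pvWrap degree.length)).length = degree.length := by simp
  rw [A_result degree b hd, B_result degree b hd]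
  refine congrArg₂ Prod.mk ?_ ?_
  · have := scatter_s_eq (degree.map (pvWrap degree.length)) hkb
    rw [hklen] at this
    exact this
  · have := scatter_p_eq (degree.map (pvWrap degree.length)) hkb
    rw [hklen] at this
    exact this
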